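-- pv_equiv track=rewrite | github.com/poonam2308/PaCoNet | src/pc/plot_gen/clustering_category_separation.py | _base_stem
-- ===== SOURCE A (Python) =====
-- def _base_stem(stem: str) -> str:
--     """Strip a single `_crop_#` token to get base key (order-agnostic pairing helper)."""
--     toks = [t for t in stem.split("_") if t]
--     out = []
--     i = 0
--     while i < len(toks):
--         if toks[i].lower() == "crop" and i + 1 < len(toks) and toks[i + 1].isdigit():
--             i += 2
--         else:
--             out.append(toks[i])
--             i += 1
--     return "_".join(out)
-- ===== SOURCE B (Python) =====
-- def _base_stem(stem: str) -> str:
--     """Strip a single `_crop_#` token to get base key (order-agnostic pairing helper)."""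
--     out = []
--     pending = None
--     for t in stem.split("_"):
--         if not t:
--             continue
--         if pending is not None and t.isdigit():
--             pending = None
--             continue
--         if pending is not None:
--             out.append(pending)
--             pending = None
--         if t.lower() == "crop":
--             pending = t
--         else:
--             out.append(t)
--     if pending is not None:
--         out.append(pending)
--     return "_".join(out)
-- ===== Notes on version B (the rewrite author's own statement) =====
-- stated objective: simpler
-- what changed: Replaced the index-based while loop with lookahead toks[i+1] by a single forward pass carrying a pending-crop state, folding the empty-token filter into the same pass.
import Mathlib
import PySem

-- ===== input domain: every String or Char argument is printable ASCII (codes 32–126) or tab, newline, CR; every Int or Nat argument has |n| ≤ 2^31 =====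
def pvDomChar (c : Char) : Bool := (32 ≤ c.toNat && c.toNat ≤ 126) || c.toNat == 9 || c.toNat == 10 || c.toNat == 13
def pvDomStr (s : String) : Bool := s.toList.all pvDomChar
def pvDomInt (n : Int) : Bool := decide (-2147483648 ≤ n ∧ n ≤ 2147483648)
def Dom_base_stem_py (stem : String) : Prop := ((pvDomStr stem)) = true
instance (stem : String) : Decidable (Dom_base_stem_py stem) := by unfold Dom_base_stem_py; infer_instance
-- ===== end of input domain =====

-- B replaces A's index-based while loop with toks[i+1] lookahead by a one-pass fold
-- carrying a pending-crop state (objective: simpler decomposition; same cost).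

-- ===== PORT A =====
-- A's while loop over toks with lookahead: recursion exposing the next two tokens.
def baseStemLoopA : List String → List String
  | [] => []
  | [t] => [t]
  | t :: d :: rest =>
    if PySem.Str.lower t == "crop" && PySem.Str.strIsdigit d then
      baseStemLoopA rest
    else
      t :: baseStemLoopA (d :: rest)

def base_stem_py (stem : String) : String :=
  let toks := ((PySem.Str.split? stem "_").getD []).filter (fun t => t ≠ "")
  PySem.Str.join "_" (baseStemLoopA toks)

-- ===== PORT B =====
-- B's loop body: state = (pending crop token, emitted tokens).
def baseStemStepB (st : Option String × List String) (t : String) : Option String × List String :=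
  match st with
  | (some c, out) =>
    if PySem.Str.strIsdigit t then (none, out)
    else if PySem.Str.lower t == "crop" then (some t, out ++ [c])
    else (none, out ++ [c, t])
  | (none, out) =>
    if PySem.Str.lower t == "crop" then (some t, out)
    else (none, out ++ [t])

def baseStemFinishB : Option String × List String → List String
  | (some c, out) => out ++ [c]
  | (none, out) => out

def base_stem_py_alt (stem : String) : String :=
  let toks := ((PySem.Str.split? stem "_").getD []).filter (fun t => t ≠ "")
  PySem.Str.join "_" (baseStemFinishB (toks.foldl baseStemStepB (none, [])))

-- ===== PRECONDITION & SPEC =====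
def Spec_base_stem_py (stem : String) (out : String) : Prop := out = base_stem_py_alt stem
instance (stem : String) (out : String) : Decidable (Spec_base_stem_py stem out) := by unfold Spec_base_stem_py; infer_instance

-- ===== CLAIM (what is proved, stated in full; the proofs are below) =====
def Claim_equal_base_stem_py : Prop := ∀ (stem : String), Dom_base_stem_py stem → Spec_base_stem_py stem (base_stem_py stem)

-- ===== LEMMAS AND PROOFS =====

-- Invariant of B's fold, both pending states at once, against A's two-token recursion.
lemma baseStem_fold_inv (toks : List String) :
    (∀ out, baseStemFinishB (toks.foldl baseStemStepB (none, out)) = out ++ baseStemLoopA toks) ∧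
    (∀ out c, PySem.Str.lower c = "crop" →
      baseStemFinishB (toks.foldl baseStemStepB (some c, out)) = out ++ baseStemLoopA (c :: toks)) := by
  induction toks with
  | nil => exact ⟨fun out => by simp [baseStemFinishB, baseStemLoopA],
            fun out c _ => by simp [baseStemFinishB, baseStemLoopA]⟩
  | cons t rest ih =>
    refine ⟨fun out => ?_, fun out c hc => ?_⟩
    · by_cases h : PySem.Str.lower t = "crop"
      · simpa [baseStemStepB, h] using ih.2 out t h
      · cases rest with
        | nil => simp [baseStemStepB, h, baseStemFinishB, baseStemLoopA]
        | cons d rest' =>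
          have := ih.1 (out ++ [t])
          simp [baseStemStepB, baseStemLoopA, h] at this ⊢
          simpa using this
    · by_cases hd : PySem.Str.strIsdigit t = true
      · have := ih.1 out
        simp only [PySem.Str.strIsdigit_eq] at hd
        simp [baseStemStepB, hd, baseStemLoopA, hc, this]
      · simp only [PySem.Str.strIsdigit_eq] at hd
        by_cases h : PySem.Str.lower t = "crop"
        · have := ih.2 (out ++ [c]) t h
          cases rest with
          | nil => simp [baseStemStepB, hd, h, baseStemLoopA, baseStemFinishB, hc] at this ⊢
          | cons d rest' =>
            simp [baseStemStepB, hd, h, baseStemLoopA, hc] at this ⊢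
            simp [this]
        · have := ih.1 (out ++ [c, t])
          cases rest with
          | nil => simp [baseStemStepB, hd, h, baseStemLoopA, baseStemFinishB, hc]
          | cons d rest' =>
            simp [baseStemStepB, hd, h, baseStemLoopA, hc] at this ⊢
            simp [this]

-- ===== VERDICT (by name: the statement is the Claim_ definition above) =====
theorem base_stem_py_spec : Claim_equal_base_stem_py := by
  intro stem _
  unfold Spec_base_stem_py base_stem_py base_stem_py_alt
  dsimp only
  rw [(baseStem_fold_inv _).1 []]
  simp
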